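-- pv_equiv track=rewrite | github.com/ahadaso042/CPS109Labs | labs109.py | domino_cycle
-- ===== SOURCE A (Python) =====
-- def domino_cycle(tiles):
--     if tiles == None : return False
--     if tiles==[]:return True
--     starting_num = tiles[0][0]
--     ending_num = tiles[-1][1]
--     if starting_num != ending_num: return False
--
--     for i in range(len(tiles) - 1):
--         if tiles[i][1] != tiles[i + 1][0]: return False
--     return True
-- ===== SOURCE B (Python) =====
-- def domino_cycle(tiles):
--     if tiles is None:
--         return False
--     heads = [a for a, _ in tiles]
--     tails = [b for _, b in tiles]
--     return heads == tails[-1:] + tails[:-1]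
-- ===== Notes on version B (the rewrite author's own statement) =====
-- stated objective: alternative
-- what changed: Instead of scanning adjacent tile pairs with an index loop plus a special-cased endpoint test, B projects the tiles into two lists (left pips, right pips) and decides the whole cycle with a single list-equality test: heads must equal the right-rotation of tails; the empty case needs no guard.
import Mathlib
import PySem

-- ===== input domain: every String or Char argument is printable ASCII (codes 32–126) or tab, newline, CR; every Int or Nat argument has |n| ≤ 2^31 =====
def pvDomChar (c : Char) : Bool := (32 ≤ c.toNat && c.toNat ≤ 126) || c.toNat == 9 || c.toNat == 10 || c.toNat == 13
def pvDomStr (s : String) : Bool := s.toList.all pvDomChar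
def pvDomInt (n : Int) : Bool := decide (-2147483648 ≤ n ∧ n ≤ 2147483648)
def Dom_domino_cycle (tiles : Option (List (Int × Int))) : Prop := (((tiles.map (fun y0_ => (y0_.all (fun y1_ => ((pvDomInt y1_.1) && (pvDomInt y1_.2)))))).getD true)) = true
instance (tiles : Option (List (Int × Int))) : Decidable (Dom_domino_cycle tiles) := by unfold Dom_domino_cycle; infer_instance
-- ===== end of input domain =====

-- B replaces A's index loop + special-cased endpoint test by projecting the tiles into the
-- list of left pips and the list of right pips and testing heads = rotate-right(tails).


-- ===== PORT A =====
def domino_cycle (tiles : Option (List (Int × Int))) : Bool :=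
  match tiles with
  | none => false                    -- if tiles == None: return False
  | some ts =>
    if ts = [] then true             -- if tiles == []: return True
    else
      match PySem.List.pyGet? ts 0, PySem.List.pyGet? ts (-1) with
      | some first, some last =>     -- starting_num = tiles[0][0]; ending_num = tiles[-1][1]
        if first.1 ≠ last.2 then false
        else
          -- for i in range(len(tiles) - 1): if tiles[i][1] != tiles[i+1][0]: return False
          (PySem.List.pyRange 0 ((ts.length : Int) - 1) 1).all (fun i =>
            match PySem.List.pyGet? ts i, PySem.List.pyGet? ts (i + 1) with
            | some a, some b => a.2 == b.1
            | _, _ => false)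
      | _, _ => false                -- unreachable: ts ≠ [] (IndexError cannot occur)

-- ===== PORT B =====
def domino_cycle_alt (tiles : Option (List (Int × Int))) : Bool :=
  match tiles with
  | none => false                    -- if tiles is None: return False
  | some ts =>
    -- heads = [a for a, _ in tiles]; tails = [b for _, b in tiles]
    let heads := ts.map Prod.fst
    let tails := ts.map Prod.snd
    -- return heads == tails[-1:] + tails[:-1]
    heads == PySem.List.slice tails (some (-1)) none ++ PySem.List.slice tails none (some (-1))

-- ===== PRECONDITION & SPEC =====
def Spec_domino_cycle (tiles : Option (List (Int × Int))) (out : Bool) : Prop := out = domino_cycle_alt tiles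
instance (tiles : Option (List (Int × Int))) (out : Bool) : Decidable (Spec_domino_cycle tiles out) := by unfold Spec_domino_cycle; infer_instance

-- ===== CLAIM =====
def Claim_equal_domino_cycle : Prop := ∀ (tiles : Option (List (Int × Int))), Dom_domino_cycle tiles → Spec_domino_cycle tiles (domino_cycle tiles)

-- ===== LEMMAS AND PROOFS =====

/-- Proof-only helper: the chain of interior adjacency checks. -/
def chainB (x : Int × Int) : List (Int × Int) → Bool
  | [] => true
  | y :: ys => (x.2 == y.1) && chainB y ys

/-- Proof-only helper: last element of `x :: xs`. -/
def lastOf (x : Int × Int) : List (Int × Int) → Int × Int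
  | [] => x
  | y :: ys => lastOf y ys

theorem getLast?_eq_lastOf (x : Int × Int) (xs : List (Int × Int)) :
    (x :: xs).getLast? = some (lastOf x xs) := by
  induction xs generalizing x with
  | nil => rfl
  | cons y ys ih => simpa [lastOf] using ih y

/-- Proof-only helper: `decide` on a cons/cons list equality splits componentwise. -/
theorem decide_cons_eq (a b : Int) (l1 l2 : List Int) :
    decide (a :: l1 = b :: l2) = (decide (a = b) && decide (l1 = l2)) := by
  by_cases h : a = b <;> by_cases h2 : l1 = l2 <;> simp [h, h2]

/-- B's interior comparison: heads of the tail vs dropLast of the tails equals `chainB`. -/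
theorem map_fst_eq_dropLast_chain (x : Int × Int) (xs : List (Int × Int)) :
    (decide (xs.map Prod.fst = ((x :: xs).map Prod.snd).dropLast)) = chainB x xs := by
  induction xs generalizing x with
  | nil => simp [chainB]
  | cons y ys ih =>
    have ih' := ih y
    simp only [List.map_cons] at ih'
    simp only [List.map_cons, List.dropLast_cons₂, chainB, Bool.beq_eq_decide_eq]
    rcases eq_or_ne y.1 x.2 with h | h
    · simp only [h]; rw [← ih']; simp
    · simp [h, Ne.symm h]

theorem range_all_chain (xs : List (Int × Int)) (pre : List (Int × Int)) (x : Int × Int) :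
    (PySem.List.pyRange (pre.length : Int) ((pre.length : Int) + (xs.length : Int)) 1).all
      (fun i =>
        match PySem.List.pyGet? (pre ++ x :: xs) i, PySem.List.pyGet? (pre ++ x :: xs) (i + 1) with
        | some a, some b => a.2 == b.1
        | _, _ => false)
      = chainB x xs := by
  induction xs generalizing pre x with
  | nil => simp [chainB, PySem.List.pyRange_one_eq_nil]
  | cons z zs ih =>
    rw [PySem.List.pyRange_one_cons (by push_cast [List.length_cons]; omega)]
    have h0 : PySem.List.pyGet? (pre ++ x :: z :: zs) (pre.length : Int) = some x :=
      PySem.List.pyGet?_append_length pre (z :: zs) x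
    have h1 : PySem.List.pyGet? (pre ++ x :: z :: zs) ((pre.length : Int) + 1) = some z := by
      have h := PySem.List.pyGet?_append_length (pre ++ [x]) zs z
      simpa [List.append_assoc] using h
    have ih' := ih (pre ++ [x]) z
    simp only [List.all_cons, h0, h1]
    have harith : (pre.length : Int) + ((z :: zs).length : Int)
        = (((pre ++ [x]).length : Int)) + (zs.length : Int) := by
      simp; omega
    have hstart : (pre.length : Int) + 1 = (((pre ++ [x]).length : Int)) := by
      simp
    rw [harith, hstart]
    simp only [List.append_assoc, List.cons_append, List.nil_append] at ih' ⊢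
    rw [ih']
    simp [chainB]

theorem slice_from_neg_one_snd (x : Int × Int) (xs : List (Int × Int)) :
    PySem.List.slice ((x :: xs).map Prod.snd) (some (-1)) none = [(lastOf x xs).2] := by
  rw [PySem.List.slice_from_neg_one]
  induction xs generalizing x with
  | nil => rfl
  | cons y ys ih => simpa [lastOf] using ih y

theorem nonempty_case (x : Int × Int) (xs : List (Int × Int)) :
    domino_cycle (some (x :: xs)) = domino_cycle_alt (some (x :: xs)) := by
  have hrange := range_all_chain xs [] x
  simp only [List.length_nil, Int.natCast_zero, List.nil_append, zero_add] at hrange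
  have hlen : ((List.length (x :: xs) : Int) - 1) = (xs.length : Int) := by simp
  have hfrom := slice_from_neg_one_snd x xs
  unfold domino_cycle domino_cycle_alt
  simp only [PySem.List.pyGet?_zero_cons, PySem.List.pyGet?_neg_one, getLast?_eq_lastOf,
    PySem.List.slice_to_neg_one, hfrom, reduceCtorEq]
  rw [hlen, hrange]
  have hB : ((x :: xs).map Prod.fst ==
      [(lastOf x xs).2] ++ ((x :: xs).map Prod.snd).dropLast)
      = ((x.1 == (lastOf x xs).2) && chainB x xs) := by
    rw [← map_fst_eq_dropLast_chain x xs]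
    simp only [List.map_cons, List.singleton_append, Bool.beq_eq_decide_eq]
    exact decide_cons_eq _ _ _ _
  rw [hB]
  by_cases h : x.1 = (lastOf x xs).2 <;>
    simp [h, Bool.beq_eq_decide_eq]

-- ===== VERDICT =====
theorem domino_cycle_spec : Claim_equal_domino_cycle := by
  intro tiles _
  unfold Spec_domino_cycle
  match tiles with
  | none => rfl
  | some [] => rfl
  | some (x :: xs) => exact nonempty_case x xs
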